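-- pv_equiv track=rewrite | github.com/zeeshansayyed/ArabicSOS | scripts/feature_extractor.py | word_to_labels
-- ===== SOURCE A (Python) =====
-- def word_to_labels(word, scheme="default"):
--     word_split = word.split('+')
--     word_len = sum([len(i) for i in word_split])
--     if scheme == "default":
--         labels = [0] * word_len
--         curr_ind = -1
--         for segment in word_split:
--             curr_ind += len(segment)
--             labels[curr_ind] = 1
--     return labels
-- ===== SOURCE B (Python) =====
-- def word_to_labels(word, scheme="default"):
--     word_len = len(word) - word.count('+')
--     if scheme == "default":
--         labels = [0] * word_len
--         pos = -1
--         for ch in word: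
--             if ch == '+':
--                 labels[pos] = 1
--             else:
--                 pos += 1
--         labels[pos] = 1
--     return labels
-- ===== Notes on version B (the rewrite author's own statement) =====
-- stated objective: simpler
-- what changed: B marks boundary labels in one character pass over the word (incrementing a position for non-'+' characters, marking on '+' and once at the end) instead of splitting the word into segments and accumulating segment lengths.
import Mathlib
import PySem

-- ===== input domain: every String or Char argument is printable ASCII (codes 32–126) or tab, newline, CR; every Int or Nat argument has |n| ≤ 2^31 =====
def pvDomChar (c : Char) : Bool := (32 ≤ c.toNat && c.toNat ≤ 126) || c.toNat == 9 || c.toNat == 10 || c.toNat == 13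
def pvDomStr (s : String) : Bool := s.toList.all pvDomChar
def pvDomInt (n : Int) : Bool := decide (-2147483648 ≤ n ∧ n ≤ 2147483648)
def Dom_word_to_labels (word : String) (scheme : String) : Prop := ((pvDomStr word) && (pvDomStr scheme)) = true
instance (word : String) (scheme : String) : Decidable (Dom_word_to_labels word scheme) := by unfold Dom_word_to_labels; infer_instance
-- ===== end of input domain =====

-- B replaces A's split-into-segments pass by a single character scan marking boundaries directly (objective: simpler).

-- ===== PORT A =====
-- loop body of A's 'for segment in word_split'
def aStep (st : List Int × Int) (segment : List Char) : List Int × Int :=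
  let ci := st.2 + (segment.length : Int)
  (PySem.List.pySetD st.1 ci 1, ci)

-- Outside Pre_ (scheme ≠ "default") Python A raises UnboundLocalError; there the port returns [].
def word_to_labels (word : String) (scheme : String) : List Int :=
  let word_split := PySem.Chars.splitOn word.toList ['+']
  let word_len := (word_split.map (fun i => i.length)).sum
  if scheme == "default" then
    (word_split.foldl aStep (List.replicate word_len 0, -1)).1
  else []

-- ===== PORT B =====
-- loop body of B's 'for ch in word'
def bStep (st : List Int × Int) (ch : Char) : List Int × Int :=
  if ch == '+' then (PySem.List.pySetD st.1 st.2 1, st.2) else (st.1, st.2 + 1)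

-- Outside Pre_ (scheme ≠ "default") Python B raises UnboundLocalError; there the port returns [].
def word_to_labels_alt (word : String) (scheme : String) : List Int :=
  let word_len := word.toList.length - word.toList.count '+'
  if scheme == "default" then
    let st := word.toList.foldl bStep (List.replicate word_len 0, -1)
    PySem.List.pySetD st.1 st.2 1
  else []

-- ===== PRECONDITION & SPEC =====
-- Pre_ excludes exactly the inputs where Python A raises: scheme ≠ "default" (UnboundLocalError)
-- and words whose characters are all '+' (IndexError on the empty labels list); B raises identically there.
def Pre_word_to_labels (word : String) (scheme : String) : Prop :=
  scheme = "default" ∧ word.toList.any (fun c => c ≠ '+') = true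
instance (word : String) (scheme : String) : Decidable (Pre_word_to_labels word scheme) := by
  unfold Pre_word_to_labels; infer_instance

def pvWitness_word_to_labels : String × String := ("a+b", "default")

def Spec_word_to_labels (word : String) (scheme : String) (out : List Int) : Prop := out = word_to_labels_alt word scheme
instance (word : String) (scheme : String) (out : List Int) : Decidable (Spec_word_to_labels word scheme out) := by unfold Spec_word_to_labels; infer_instance

-- ===== CLAIM (what is proved, stated in full; the proofs are below) =====
def Claim_equal_word_to_labels : Prop := ∀ (word : String) (scheme : String), Dom_word_to_labels word scheme → Pre_word_to_labels word scheme → Spec_word_to_labels word scheme (word_to_labels word scheme)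

-- ===== LEMMAS AND PROOFS =====

-- a simple structural recursion equal to PySem.Chars.splitOn · ['+']
def mySplit (pre : List Char) : List Char → List (List Char)
  | [] => [pre]
  | c :: t => if c = '+' then pre :: mySplit [] t else mySplit (pre ++ [c]) t

theorem splitOn_go_eq : ∀ (fuel : Nat) (l cur : List Char) (acc : List (List Char)), l.length < fuel →
    PySem.Chars.splitOn.go ['+'] fuel l cur acc = acc.reverse ++ mySplit cur.reverse l := by
  intro fuel
  induction fuel with
  | zero => intro l cur acc h; omega
  | succ f ih =>
    intro l cur acc h
    cases l with
    | nil => simp [PySem.Chars.splitOn.go, mySplit]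
    | cons c rest =>
      by_cases hc : c = '+'
      · subst hc
        rw [show PySem.Chars.splitOn.go ['+'] (f+1) ('+' :: rest) cur acc
              = PySem.Chars.splitOn.go ['+'] f rest [] (cur.reverse :: acc) by
            simp [PySem.Chars.splitOn.go, List.isPrefixOf]]
        rw [ih rest [] (cur.reverse :: acc) (by simp at h; omega)]
        simp [mySplit]
      · rw [show PySem.Chars.splitOn.go ['+'] (f+1) (c :: rest) cur acc
              = PySem.Chars.splitOn.go ['+'] f rest (c :: cur) acc by
            simp [PySem.Chars.splitOn.go, List.isPrefixOf, Ne.symm hc]]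
        rw [ih rest (c :: cur) acc (by simp at h; omega)]
        simp [mySplit, hc]

theorem splitOn_eq (l : List Char) : PySem.Chars.splitOn l ['+'] = mySplit [] l := by
  have := splitOn_go_eq (l.length + 1) l [] [] (by omega)
  simpa [PySem.Chars.splitOn] using this

theorem mySplit_pre : ∀ (l pre : List Char), ∃ h tl, mySplit [] l = h :: tl ∧ mySplit pre l = (pre ++ h) :: tl := by
  intro l
  induction l with
  | nil => intro pre; exact ⟨[], [], by simp [mySplit], by simp [mySplit]⟩
  | cons c t ih =>
    intro pre
    by_cases hc : c = '+'
    · subst hc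
      exact ⟨[], mySplit [] t, by simp [mySplit], by simp [mySplit]⟩
    · obtain ⟨h, tl, h1, h2⟩ := ih (pre ++ [c])
      obtain ⟨h', tl', h1', h2'⟩ := ih [c]
      rw [h1] at h1'
      injection h1' with e1 e2
      subst e1; subst e2
      refine ⟨c :: h, tl, ?_, ?_⟩
      · simpa [mySplit, hc] using h2'
      · simpa [mySplit, hc] using h2

theorem sum_len : ∀ l : List Char, ((mySplit [] l).map (fun i => i.length)).sum + l.count '+' = l.length := by
  intro l
  induction l with
  | nil => simp [mySplit]
  | cons c t ih =>
    by_cases hc : c = '+'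
    · subst hc; simp [mySplit]; omega
    · obtain ⟨h, tl, h1, h2⟩ := mySplit_pre t [c]
      have : mySplit [] (c :: t) = (c :: h) :: tl := by simpa [mySplit, hc] using h2
      rw [h1] at ih
      simp [this, hc] at *
      omega

theorem main_fold : ∀ (l : List Char) (labels : List Int) (pos : Int),
    PySem.List.pySetD (l.foldl bStep (labels, pos)).1 (l.foldl bStep (labels, pos)).2 1
      = ((mySplit [] l).foldl aStep (labels, pos)).1 := by
  intro l
  induction l with
  | nil => intro labels pos; simp [mySplit, aStep]
  | cons c t ih =>
    intro labels pos
    by_cases hc : c = '+'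
    · subst hc
      have : mySplit [] ('+' :: t) = [] :: mySplit [] t := by simp [mySplit]
      rw [this]
      simp only [List.foldl_cons]
      have hb : bStep (labels, pos) '+' = (PySem.List.pySetD labels pos 1, pos) := by
        simp [bStep]
      have ha : aStep (labels, pos) [] = (PySem.List.pySetD labels pos 1, pos) := by
        simp [aStep]
      rw [hb, ha]
      exact ih _ _
    · obtain ⟨h, tl, h1, h2⟩ := mySplit_pre t [c]
      have hms : mySplit [] (c :: t) = (c :: h) :: tl := by simpa [mySplit, hc] using h2
      rw [hms]
      simp only [List.foldl_cons]
      have hb : bStep (labels, pos) c = (labels, pos + 1) := by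
        simp [bStep, hc]
      have ha : aStep (labels, pos) (c :: h) = aStep (labels, pos + 1) h := by
        simp [aStep]; constructor <;> ring_nf
      rw [hb, ha]
      have := ih labels (pos + 1)
      rw [h1] at this
      simpa only [List.foldl_cons] using this

-- ===== VERDICT (by name: the statement is the Claim_ definition above) =====
theorem word_to_labels_spec : Claim_equal_word_to_labels := by
  intro word scheme _ hpre
  obtain ⟨hs, -⟩ := hpre
  subst hs
  unfold Spec_word_to_labels word_to_labels word_to_labels_alt
  simp only [splitOn_eq, BEq.rfl, if_true]
  have hsum := sum_len word.toList
  have hlen : ((mySplit [] word.toList).map (fun i => i.length)).sum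
      = word.toList.length - word.toList.count '+' := by omega
  rw [hlen]
  exact (main_fold word.toList _ _).symm
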